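-- pv_equiv track=rewrite | github.com/faulknerpearce/advent_of_code | 2015/day_8/part_2.py | count_encoded_literals
-- ===== SOURCE A (Python) =====
-- def count_encoded_literals(text):
--     total_encoded_chars = 0
--     total_string_code = 0
--
--     for input_str in text:
--         total_string_code += len(input_str)
--         encoded_chars = 2
--
--         for char in input_str:
--             if char == '\\' or char == '"':
--                 encoded_chars += 2
--             else:
--                 encoded_chars += 1
--         total_encoded_chars += encoded_chars
--
--     result = total_encoded_chars - total_string_code
--     return result
-- ===== SOURCE B (Python) =====
-- def count_encoded_literals(text):
--     specials = 0
--     for s in text: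
--         specials += s.count('\\') + s.count('"')
--     return 2 * len(text) + specials
-- ===== Notes on version B (the rewrite author's own statement) =====
-- stated objective: simpler
-- what changed: The original and encoded lengths cancel algebraically, so B never tracks them: each string contributes exactly 2 plus its number of backslash/quote characters, accumulated in one pass with str.count.
import Mathlib
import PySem

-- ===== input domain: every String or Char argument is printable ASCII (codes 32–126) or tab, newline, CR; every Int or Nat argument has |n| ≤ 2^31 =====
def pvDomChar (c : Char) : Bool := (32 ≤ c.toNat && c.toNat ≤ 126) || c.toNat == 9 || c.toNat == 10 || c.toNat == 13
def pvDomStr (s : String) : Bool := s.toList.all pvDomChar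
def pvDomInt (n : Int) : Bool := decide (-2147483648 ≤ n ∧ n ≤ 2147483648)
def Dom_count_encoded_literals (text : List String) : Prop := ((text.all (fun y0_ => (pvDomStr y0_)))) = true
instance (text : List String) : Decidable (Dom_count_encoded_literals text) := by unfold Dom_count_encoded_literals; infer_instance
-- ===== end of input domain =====

-- B replaces A's two running length totals (which cancel algebraically) by a single
-- per-string count of backslash/quote characters: simpler decomposition, same cost.

-- ===== PORT A =====
def count_encoded_literals (text : List String) : Int :=
  let r := text.foldl
    (fun (p : Int × Int) input_str =>
      let total_string_code := p.2 + PySem.Str.len input_str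
      let encoded_chars : Int := input_str.toList.foldl
        (fun encoded_chars char =>
          if char = '\\' ∨ char = '"' then encoded_chars + 2 else encoded_chars + 1) 2
      (p.1 + encoded_chars, total_string_code))
    (0, 0)
  r.1 - r.2

-- ===== PORT B =====
def count_encoded_literals_alt (text : List String) : Int :=
  let specials : Int := text.foldl
    (fun specials s =>
      specials + ((PySem.Str.count s "\\" : Int) + (PySem.Str.count s "\"" : Int))) 0
  2 * (text.length : Int) + specials

-- ===== PRECONDITION & SPEC =====
def Spec_count_encoded_literals (text : List String) (out : Int) : Prop := out = count_encoded_literals_alt text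
instance (text : List String) (out : Int) : Decidable (Spec_count_encoded_literals text out) := by unfold Spec_count_encoded_literals; infer_instance

-- ===== CLAIM (what is proved, stated in full; the proofs are below) =====
def Claim_equal_count_encoded_literals : Prop := ∀ (text : List String), Dom_count_encoded_literals text → Spec_count_encoded_literals text (count_encoded_literals text)

-- ===== LEMMAS AND PROOFS =====

-- Chars.count with a one-character pattern is List.count
theorem chars_count_go_single (c : Char) :
    ∀ (s : List Char) (fuel acc : Nat), s.length ≤ fuel →
      PySem.Chars.count.go [c] fuel s acc = acc + s.count c := by
  intro s
  induction s with
  | nil => intro fuel acc _; cases fuel <;> simp [PySem.Chars.count.go]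
  | cons h t ih =>
    intro fuel acc hle
    cases fuel with
    | zero => simp at hle
    | succ n =>
      by_cases hc : c = h
      · subst hc
        simp only [PySem.Chars.count.go, List.isPrefixOf, beq_self_eq_true,
          Bool.and_true, if_true, List.length_singleton, List.drop_succ_cons,
          List.drop_zero]
        rw [ih n (acc + 1) (by simpa using hle)]
        simp
        omega
      · have hpre : [c].isPrefixOf (h :: t) = false := by
          simp [List.isPrefixOf]; exact fun h' => hc h'
        simp only [PySem.Chars.count.go, hpre, Bool.false_eq_true, if_false]
        rw [ih n acc (by simpa using hle)]
        simp [Ne.symm hc]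

theorem str_count_single (s : String) (c : Char) :
    PySem.Str.count s (String.ofList [c]) = s.toList.count c := by
  rw [PySem.Str.count_eq]
  have : (String.ofList [c]).toList = [c] := String.toList_ofList
  rw [this]
  unfold PySem.Chars.count
  exact (chars_count_go_single c s.toList s.toList.length 0 le_rfl).trans (by omega)

-- A's inner loop computes 2 + len + #specials
theorem innerA (s : List Char) :
    ∀ (e : Int), s.foldl
      (fun encoded_chars char =>
        if char = '\\' ∨ char = '"' then encoded_chars + 2 else encoded_chars + 1) e
      = e + s.length + s.count '\\' + s.count '"' := by
  induction s with
  | nil => intro e; simp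
  | cons h t ih =>
    intro e
    simp only [List.foldl_cons, ih, List.length_cons, List.count_cons]
    by_cases h1 : h = '\\'
    · subst h1; simp; ring
    · by_cases h2 : h = '"'
      · subst h2; simp [h1]; ring
      · simp [h1, h2]; ring

-- B's fold shifted by its accumulator
theorem shiftB (l : List String) :
    ∀ (a : Int), l.foldl
      (fun specials s =>
        specials + ((PySem.Str.count s "\\" : Int) + (PySem.Str.count s "\"" : Int))) a
      = a + l.foldl
      (fun specials s =>
        specials + ((PySem.Str.count s "\\" : Int) + (PySem.Str.count s "\"" : Int))) 0 := by
  induction l with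
  | nil => intro a; simp
  | cons h t ih => intro a; simp only [List.foldl_cons]; rw [ih, ih (0 + _)]; ring

theorem mainA (l : List String) :
    ∀ (te ts : Int),
      (let r := l.foldl
        (fun (p : Int × Int) input_str =>
          let total_string_code := p.2 + PySem.Str.len input_str
          let encoded_chars : Int := input_str.toList.foldl
            (fun encoded_chars char =>
              if char = '\\' ∨ char = '"' then encoded_chars + 2 else encoded_chars + 1) 2
          (p.1 + encoded_chars, total_string_code))
        (te, ts)
       r.1 - r.2)
      = te - ts + count_encoded_literals_alt l := by
  induction l with
  | nil => intro te ts; simp [count_encoded_literals_alt]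
  | cons h t ih =>
    intro te ts
    simp only [List.foldl_cons]
    rw [ih]
    unfold count_encoded_literals_alt
    simp only [List.foldl_cons, List.length_cons]
    rw [innerA, shiftB _ (0 + _)]
    have h1 : PySem.Str.count h "\\" = h.toList.count '\\' := str_count_single h '\\'
    have h2 : PySem.Str.count h "\"" = h.toList.count '"' := str_count_single h '"'
    have hlen : PySem.Str.len h = (h.toList.length : Int) := by
      simp [PySem.Str.len]
    rw [h1, h2, hlen]
    push_cast
    ring

-- ===== VERDICT (by name: the statement is the Claim_ definition above) =====
theorem count_encoded_literals_spec : Claim_equal_count_encoded_literals := by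
  intro text _
  show count_encoded_literals text = count_encoded_literals_alt text
  unfold count_encoded_literals
  simpa using mainA text 0 0
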